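-- pv_equiv track=rewrite | github.com/gaalcaras/ncm-R | pythonx/cm_sources/r.py | get_open_bracket_col
-- ===== SOURCE A (Python) =====
-- def get_open_bracket_col(typed=''):
--     """Find the column of the last unclosed bracket
--
--     :typed: typed content
--     :returns: position of last unclosed bracket
--     """
--     if not typed:
--         return -1
--
--     open_brackets = []
--     inside_quotes = False
--     quotes = ''
--
--     for col, char in enumerate(typed):
--         if char in ('"', "'") and typed[col-1] != "\"":
--             if not inside_quotes:
--                 quotes = char
--                 inside_quotes = True
--             else:
--                 inside_quotes = False if char == quotes else True
--             continue
--
--         if char == '(':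
--             open_brackets.append(col)
--
--         if char == ')':
--             try:
--                 open_brackets.pop()
--             except IndexError:
--                 return -1
--
--     try:
--         result = open_brackets.pop()
--     except IndexError:
--         result = -1
--
--     return result
-- ===== SOURCE B (Python) =====
-- def get_open_bracket_col(typed=''):
--     """Find the column of the last unclosed bracket.
--
--     Two counter passes instead of a position stack: a forward depth count
--     rejects unbalanced/balanced input, then a right-to-left scan finds the
--     rightmost unmatched '(' .
--     (The quote-tracking state in the original never affects the result, so
--     it is dropped.)
--     """
--     depth = 0
--     for ch in typed:
--         if ch == '(':
--             depth += 1
--         elif ch == ')':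
--             if depth == 0:
--                 return -1
--             depth -= 1
--     if depth == 0:
--         return -1
--     pending = 0
--     for col in range(len(typed) - 1, -1, -1):
--         ch = typed[col]
--         if ch == ')':
--             pending += 1
--         elif ch == '(':
--             if pending:
--                 pending -= 1
--             else:
--                 return col
--     return -1
-- ===== Notes on version B (the rewrite author's own statement) =====
-- stated objective: faster
-- what changed: Replaces the left-to-right position stack (and the dead quote-tracking state, which never affects the result) with two integer-counter passes: a forward depth pass that detects unbalanced/balanced input, then a right-to-left pending-close scan that returns the rightmost unmatched open bracket directly.
import Mathlib
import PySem

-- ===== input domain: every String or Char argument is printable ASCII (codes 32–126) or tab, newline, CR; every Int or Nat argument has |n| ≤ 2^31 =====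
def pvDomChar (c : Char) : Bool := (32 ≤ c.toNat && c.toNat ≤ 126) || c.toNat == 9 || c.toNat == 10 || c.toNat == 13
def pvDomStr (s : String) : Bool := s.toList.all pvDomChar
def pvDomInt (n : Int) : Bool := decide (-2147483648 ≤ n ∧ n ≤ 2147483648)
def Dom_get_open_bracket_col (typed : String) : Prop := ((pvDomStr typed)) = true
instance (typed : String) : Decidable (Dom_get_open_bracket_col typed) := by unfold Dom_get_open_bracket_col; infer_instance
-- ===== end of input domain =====

-- ===== PORT A =====
-- B: two integer-counter passes (forward depth check + right-to-left pending-close scan)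
-- instead of A's position stack and dead quote-tracking state; equal return values proved on all inputs.

-- A's loop: Python's list append/pop at the end = push/pop of the stack top, modeled at the list head.
def aLoop (typed : String) : List (Int × Char) → List Int → Bool → String → Int
  | [], stack, _, _ =>
    -- final: result = open_brackets.pop() or -1 on IndexError
    match stack with
    | [] => -1
    | x :: _ => x
  | (col, char) :: rest, stack, inside_quotes, quotes =>
    if (char = '"' ∨ char = '\'') ∧ PySem.Str.pyGet? typed (col - 1) ≠ some '"' then
      if ¬ inside_quotes then
        aLoop typed rest stack true (String.ofList [char])
      else
        aLoop typed rest stack (if String.ofList [char] = quotes then false else true) quotes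
    else
      if char = '(' then
        aLoop typed rest (col :: stack) inside_quotes quotes
      else if char = ')' then
        match stack with
        | [] => -1          -- pop on empty list: IndexError branch, return -1
        | _ :: stack' => aLoop typed rest stack' inside_quotes quotes
      else
        aLoop typed rest stack inside_quotes quotes

def get_open_bracket_col (typed : String) : Int :=
  if typed = "" then -1
  else aLoop typed (PySem.List.enumerate typed.toList) [] false ""

-- ===== PORT B =====
-- forward pass: depth counter; none = early `return -1` on an unbalanced ')'
def bFwd : List Char → Int → Option Int
  | [], d => some d
  | c :: t, d =>
    if c = '(' then bFwd t (d + 1)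
    else if c = ')' then (if d = 0 then none else bFwd t (d - 1))
    else bFwd t d

-- reverse pass over the reversed enumerated characters, pending-close counter
def bRev : List (Int × Char) → Int → Int
  | [], _ => -1
  | (col, c) :: t, pending =>
    if c = ')' then bRev t (pending + 1)
    else if c = '(' then (if pending ≠ 0 then bRev t (pending - 1) else col)
    else bRev t pending

def get_open_bracket_col_alt (typed : String) : Int :=
  match bFwd typed.toList 0 with
  | none => -1
  | some d =>
    if d = 0 then -1
    else bRev (PySem.List.enumerate typed.toList).reverse 0

-- ===== PRECONDITION & SPEC =====
def Spec_get_open_bracket_col (typed : String) (out : Int) : Prop := out = get_open_bracket_col_alt typed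
instance (typed : String) (out : Int) : Decidable (Spec_get_open_bracket_col typed out) := by unfold Spec_get_open_bracket_col; infer_instance

-- ===== CLAIM (what is proved, stated in full; the proofs are below) =====
def Claim_equal_get_open_bracket_col : Prop := ∀ (typed : String), Dom_get_open_bracket_col typed → Spec_get_open_bracket_col typed (get_open_bracket_col typed)

-- ===== LEMMAS AND PROOFS =====

-- quote-free view of A's loop: only the bracket stack matters
def fwdS : List (Int × Char) → List Int → Option (List Int)
  | [], s => some s
  | (col, c) :: t, s =>
    if c = '(' then fwdS t (col :: s)
    else if c = ')' then
      match s with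
      | [] => none
      | _ :: s' => fwdS t s'
    else fwdS t s

theorem aLoop_eq_fwdS (typed : String) (l : List (Int × Char)) (s : List Int)
    (inside : Bool) (quotes : String) :
    aLoop typed l s inside quotes =
      (match fwdS l s with
       | none => -1
       | some [] => -1
       | some (x :: _) => x) := by
  induction l generalizing s inside quotes with
  | nil => cases s <;> rfl
  | cons hd t ih =>
    obtain ⟨col, c⟩ := hd
    by_cases hq : (c = '"' ∨ c = '\'') ∧ PySem.Str.pyGet? typed (col - 1) ≠ some '"'
    · have hc1 : c ≠ '(' := by rcases hq.1 with h | h <;> simp [h]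
      have hc2 : c ≠ ')' := by rcases hq.1 with h | h <;> simp [h]
      simp only [aLoop, fwdS, if_pos hq, if_neg hc1, if_neg hc2]
      split <;> exact ih ..
    · have : aLoop typed ((col, c) :: t) s inside quotes =
        (if c = '(' then aLoop typed t (col :: s) inside quotes
         else if c = ')' then
           match s with
           | [] => -1
           | _ :: s' => aLoop typed t s' inside quotes
         else aLoop typed t s inside quotes) := by
        simp only [aLoop, if_neg hq]
      rw [this]
      simp only [fwdS]
      split_ifs with h1 h2
      · exact ih ..
      · cases s with
        | nil => rfl
        | cons a s' => exact ih ..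
      · exact ih ..

theorem map_snd_enumerate {α : Type} (l : List α) (st : Int) :
    (PySem.List.enumerate l st).map Prod.snd = l := by
  induction l generalizing st with
  | nil => rfl
  | cons x t ih => simp [PySem.List.enumerate_cons, ih]

theorem bFwd_eq_fwdS (l : List (Int × Char)) (s : List Int) :
    bFwd (l.map Prod.snd) (s.length : Int) =
      (fwdS l s).map (fun st => (st.length : Int)) := by
  induction l generalizing s with
  | nil => rfl
  | cons hd t ih =>
    obtain ⟨col, c⟩ := hd
    by_cases h1 : c = '('
    · simp only [List.map_cons, bFwd, fwdS, if_pos h1]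
      have h := ih (col :: s)
      have : (((col :: s).length : Nat) : Int) = (s.length : Int) + 1 := by
        simp
      rw [this] at h
      exact h
    · by_cases h2 : c = ')'
      · cases s with
        | nil => simp [List.map_cons, bFwd, fwdS, h2]
        | cons a s' =>
          have hne : (((a :: s').length : Nat) : Int) ≠ 0 := by
            rw [List.length_cons]; push_cast; omega
          simp only [List.map_cons, bFwd, fwdS, if_neg h1, if_pos h2, if_neg hne]
          have harith : (((a :: s').length : Nat) : Int) - 1 = (s'.length : Int) := by
            simp
          rw [harith]
          exact ih s'
      · simp only [List.map_cons, bFwd, fwdS, if_neg h1, if_neg h2]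
        exact ih s

theorem fwdS_append (a b : List (Int × Char)) (s : List Int) :
    fwdS (a ++ b) s = (fwdS a s).bind (fun s' => fwdS b s') := by
  induction a generalizing s with
  | nil => rfl
  | cons hd t ih =>
    obtain ⟨col, c⟩ := hd
    simp only [List.cons_append, fwdS]
    split_ifs with h1 h2
    · exact ih (col :: s)
    · cases s with
      | nil => rfl
      | cons x s' => exact ih s'
    · exact ih s

theorem bRev_eq (l : List (Int × Char)) (s : List Int) (k : Nat)
    (h : fwdS l [] = some s) :
    bRev l.reverse (k : Int) = ((s.drop k).head?.getD (-1)) := by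
  induction l using List.reverseRecOn generalizing k s with
  | nil =>
    simp only [fwdS] at h
    cases h
    simp [bRev]
  | append_singleton l' hd ih =>
    obtain ⟨col, c⟩ := hd
    rw [fwdS_append] at h
    cases h0 : fwdS l' [] with
    | none => rw [h0] at h; simp at h
    | some s0 =>
      rw [h0] at h
      simp only [Option.bind_some, fwdS] at h
      rw [List.reverse_append, List.reverse_singleton, List.singleton_append]
      simp only [bRev]
      split_ifs at h with h1 h2
      · -- c = '('  : s = col :: s0
        cases h
        have hcne : c ≠ ')' := by simp [h1]
        rw [if_neg hcne, if_pos h1]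
        cases k with
        | zero => simp
        | succ n =>
          have hne : ((n + 1 : Nat) : Int) ≠ 0 := by push_cast; omega
          have harith : ((n + 1 : Nat) : Int) - 1 = (n : Int) := by push_cast; omega
          rw [if_pos hne, harith, ih s0 n h0]
          simp
      · -- c = ')'
        cases s0 with
        | nil => simp at h
        | cons a s0' =>
          simp only [fwdS] at h
          cases h
          rw [if_pos h2]
          have : ((k : Int) + 1) = ((k + 1 : Nat) : Int) := by push_cast; ring
          rw [this, ih _ (k + 1) h0]
          simp
      · -- other char
        have hs : s0 = s := by simpa using h
        subst hs
        rw [if_neg h2, if_neg h1]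
        exact ih s0 k h0

-- ===== VERDICT (by name: the statement is the Claim_ definition above) =====
theorem get_open_bracket_col_spec : Claim_equal_get_open_bracket_col := by
  intro typed _
  unfold Spec_get_open_bracket_col get_open_bracket_col get_open_bracket_col_alt
  by_cases he : typed = ""
  · subst he; decide
  · rw [if_neg he]
    rw [aLoop_eq_fwdS]
    have hmap := map_snd_enumerate typed.toList (0 : Int)
    have hb := bFwd_eq_fwdS (PySem.List.enumerate typed.toList) []
    rw [hmap] at hb
    simp only [List.length_nil, Int.natCast_zero] at hb
    rw [hb]
    cases h0 : fwdS (PySem.List.enumerate typed.toList) [] with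
    | none => rfl
    | some s =>
      cases s with
      | nil => rfl
      | cons x rest =>
        have hne : ((rest.length + 1 : Nat) : Int) ≠ 0 := by push_cast; omega
        simp only [Option.map_some, List.length_cons, if_neg hne]
        have := bRev_eq (PySem.List.enumerate typed.toList) (x :: rest) 0 h0
        simp only [Int.natCast_zero, List.drop_zero, List.head?_cons,
          Option.getD_some] at this
        rw [this]
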